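-- pv_equiv track=rewrite | github.com/danwflynn/ARM-LEGv8-CPU | schematic_generator.py | get_leafs_of_keyword
-- ===== SOURCE A (Python) =====
-- def get_leafs_of_keyword(submodule, keyword):
--   input_names = []
--   input = ""
--   for raw_line in submodule:
--     line = raw_line
--     if keyword != "reg": line = raw_line.replace(" reg ", " ").replace(" reg[", "[")
--     if line.startswith(keyword):
--       outside_brackets = True
--       for char in line[len(keyword):]:
--         if char == " ": continue
--         elif char == "[": outside_brackets = False
--         elif char == "]": outside_brackets = True
--         elif outside_brackets and char != "," and char != ";": input += char
--         elif outside_brackets and (char == "," or char == ";"):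
--           input_names.append(input)
--           input = ""
--   return input_names
-- ===== SOURCE B (Python) =====
-- def _after_rb(s):
--     # suffix after the first ']' (empty string if there is none)
--     return s.partition(']')[2]
--
-- def _clean(s):
--     # drop spaces and stray ']' characters, and delete every '['-to-']' bracket
--     # region (an unmatched '[' deletes the rest of the string)
--     head, sep, tail = s.partition('[')
--     kept = ''.join(c for c in head if c != ' ' and c != ']')
--     return kept + (_clean(_after_rb(tail)) if sep else '')
--
-- def get_leafs_of_keyword(submodule, keyword):
--     body = ""
--     for raw_line in submodule:
--         line = raw_line if keyword == "reg" else raw_line.replace(" reg ", " ").replace(" reg[", "[")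
--         if line.startswith(keyword):
--             body += _clean(line[len(keyword):])
--     tokens = body.replace(";", ",").split(",")
--     return tokens[:-1]
-- ===== Notes on version B (the rewrite author's own statement) =====
-- stated objective: alternative
-- what changed: A interleaves bracket/space handling with token accumulation in one per-character FSM carrying a running token across lines; B first cleans each matching line by partitioning on '[' (dropping bracket regions, spaces and stray ']'), joins the cleaned pieces into one string, then splits it once on ','/';' and drops the final token.
import Mathlib
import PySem

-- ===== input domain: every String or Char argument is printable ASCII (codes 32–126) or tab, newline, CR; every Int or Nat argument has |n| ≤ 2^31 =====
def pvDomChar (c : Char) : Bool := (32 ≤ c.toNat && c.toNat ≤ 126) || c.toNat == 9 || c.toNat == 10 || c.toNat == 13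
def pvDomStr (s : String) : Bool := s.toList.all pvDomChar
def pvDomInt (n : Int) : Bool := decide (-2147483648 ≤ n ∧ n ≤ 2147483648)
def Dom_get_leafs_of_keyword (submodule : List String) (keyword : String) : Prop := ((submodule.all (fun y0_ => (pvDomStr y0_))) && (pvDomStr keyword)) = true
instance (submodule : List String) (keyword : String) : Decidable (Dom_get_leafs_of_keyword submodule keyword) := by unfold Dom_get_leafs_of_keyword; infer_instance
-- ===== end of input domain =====

-- B replaces A's single per-character FSM (bracket state + running token carried across
-- lines) by clean-each-line / join / split-once-and-drop-last: an alternative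
-- decomposition of the same cost.

-- ===== PORT A =====
-- state: (input_names, input, outside_brackets); one step of A's inner character loop
def pvA_step (st : List String × List Char × Bool) (c : Char) : List String × List Char × Bool :=
  if c = ' ' then st
  else if c = '[' then (st.1, st.2.1, false)
  else if c = ']' then (st.1, st.2.1, true)
  else if st.2.2 && !(c = ',') && !(c = ';') then (st.1, st.2.1 ++ [c], st.2.2)
  else if st.2.2 && (c = ',' || c = ';') then (st.1 ++ [String.ofList st.2.1], [], st.2.2)
  else st

def get_leafs_of_keyword (submodule : List String) (keyword : String) : List String :=
  (submodule.foldl (fun (acc : List String × List Char) raw_line =>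
      let line := if keyword ≠ "reg" then
          PySem.Str.replace (PySem.Str.replace raw_line " reg " " ") " reg[" "["
        else raw_line
      if PySem.Str.startswith line keyword then
        -- line[len(keyword):] : slice with a nonnegative lower bound = drop (exact on ASCII)
        let r := ((line.toList.drop keyword.toList.length).foldl pvA_step (acc.1, acc.2, true))
        (r.1, r.2.1)
      else acc) ([], [])).1

-- ===== PORT B =====
-- _after_rb: s.partition(']')[2] — the suffix after the first ']' (empty if none); exact hand port
def pvB_afterRB (s : List Char) : List Char := (s.dropWhile (· ≠ ']')).drop 1

theorem pvB_afterRB_length_le (s : List Char) : (pvB_afterRB s).length ≤ s.length := by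
  unfold pvB_afterRB
  calc ((s.dropWhile (· ≠ ']')).drop 1).length ≤ (s.dropWhile (· ≠ ']')).length := by
        simp
    _ ≤ s.length := List.length_dropWhile_le _ _

theorem pvB_clean_rec_lt (s : List Char) (h : '[' ∈ s) :
    (pvB_afterRB ((s.dropWhile (· ≠ '[')).drop 1)).length < s.length := by
  have h1 : s.dropWhile (· ≠ '[') ≠ [] := by
    intro hnil
    have := List.dropWhile_eq_nil_iff.mp hnil '[' h
    simp at this
  have h2 : 0 < (s.dropWhile (· ≠ '[')).length := List.length_pos_of_ne_nil h1
  have h3 : (s.dropWhile (· ≠ '[')).length ≤ s.length := List.length_dropWhile_le _ _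
  have h4 := pvB_afterRB_length_le ((s.dropWhile (· ≠ '[')).drop 1)
  have h5 : ((s.dropWhile (· ≠ '[')).drop 1).length = (s.dropWhile (· ≠ '[')).length - 1 :=
    List.length_drop ..
  omega

-- _clean: head, sep, tail = s.partition('['); keep head minus ' '/']'; recurse past the
-- bracket region when a '[' was found (partition ported as takeWhile/dropWhile; exact)
def pvB_clean (s : List Char) : List Char :=
  let head := s.takeWhile (· ≠ '[')
  let kept := head.filter (fun c => c ≠ ' ' && c ≠ ']')
  if _hbr : '[' ∈ s then kept ++ pvB_clean (pvB_afterRB ((s.dropWhile (· ≠ '[')).drop 1))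
  else kept
termination_by s.length
decreasing_by exact pvB_clean_rec_lt s _hbr

def get_leafs_of_keyword_alt (submodule : List String) (keyword : String) : List String :=
  let body := submodule.foldl (fun (body : List Char) raw_line =>
      let line := if keyword = "reg" then raw_line
        else PySem.Str.replace (PySem.Str.replace raw_line " reg " " ") " reg[" "["
      if PySem.Str.startswith line keyword then
        body ++ pvB_clean (line.toList.drop keyword.toList.length)
      else body) []
  -- body.replace(";", ",").split(","), then tokens[:-1] (= dropLast)
  let tokens := PySem.Chars.splitOn (PySem.Chars.replace body [';'] [',']) [',']
  (tokens.map String.ofList).dropLast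

-- ===== PRECONDITION & SPEC =====
def Spec_get_leafs_of_keyword (submodule : List String) (keyword : String) (out : List String) : Prop := out = get_leafs_of_keyword_alt submodule keyword
instance (submodule : List String) (keyword : String) (out : List String) : Decidable (Spec_get_leafs_of_keyword submodule keyword out) := by unfold Spec_get_leafs_of_keyword; infer_instance

-- ===== CLAIM (what is proved, stated in full; the proofs are below) =====
def Claim_equal_get_leafs_of_keyword : Prop := ∀ (submodule : List String) (keyword : String), Dom_get_leafs_of_keyword submodule keyword → Spec_get_leafs_of_keyword submodule keyword (get_leafs_of_keyword submodule keyword)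

-- ===== LEMMAS AND PROOFS =====

-- reference cleaner: A's space/bracket handling as a two-state recursion
def pvCleanF : Bool → List Char → List Char
  | _, [] => []
  | b, c :: t =>
    if c = ' ' then pvCleanF b t
    else if c = '[' then pvCleanF false t
    else if c = ']' then pvCleanF true t
    else if b then c :: pvCleanF b t else pvCleanF b t

-- reference splitter on ',' only
def pvSplitC : List Char → List (List Char)
  | [] => [[]]
  | c :: t => if c = ',' then [] :: pvSplitC t else (pvSplitC t).modifyHead (c :: ·)

-- reference splitter on both delimiters
def pvSplitD : List Char → List (List Char)
  | [] => [[]]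
  | c :: t => if c = ',' ∨ c = ';' then [] :: pvSplitD t else (pvSplitD t).modifyHead (c :: ·)

-- the token machine: A's accumulation restricted to cleaned characters
def pvTokStep (st : List String × List Char) (c : Char) : List String × List Char :=
  if c = ',' ∨ c = ';' then (st.1 ++ [String.ofList st.2], []) else (st.1, st.2 ++ [c])

-- what one line contributes to the joined cleaned body
def pvAdd (keyword : String) (raw_line : String) : List Char :=
  let line := if keyword = "reg" then raw_line
    else PySem.Str.replace (PySem.Str.replace raw_line " reg " " ") " reg[" "["
  if PySem.Str.startswith line keyword then
    pvCleanF true (line.toList.drop keyword.toList.length)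
  else []

theorem pvSplitC_map (s : List Char) :
    pvSplitC (s.map (fun c => if c = ';' then ',' else c)) = pvSplitD s := by
  induction s with
  | nil => rfl
  | cons c t ih =>
    by_cases h1 : c = ';'
    · simp [pvSplitC, pvSplitD, h1, ih]
    · by_cases h2 : c = ','
      · simp [pvSplitC, pvSplitD, h2, ih]
      · simp [pvSplitC, pvSplitD, h1, h2, ih]

theorem pvSplitD_ne_nil (s : List Char) : pvSplitD s ≠ [] := by
  cases s with
  | nil => simp [pvSplitD]
  | cons c t =>
    simp only [pvSplitD]
    split
    · simp
    · exact fun h => by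
        have := List.modifyHead_eq_nil_iff.mp h
        exact pvSplitD_ne_nil t this

theorem pvTok_eq_splitD (cs : List Char) : ∀ (names : List String) (cur : List Char),
    (cs.foldl pvTokStep (names, cur)).1 =
      names ++ (((cur ++ (pvSplitD cs).headI) :: (pvSplitD cs).tail).dropLast.map String.ofList) := by
  induction cs with
  | nil => intro names cur; simp [pvSplitD]
  | cons c t ih =>
    intro names cur
    by_cases h : c = ',' ∨ c = ';'
    · have hne := pvSplitD_ne_nil t
      obtain ⟨x, xs, hx⟩ := List.exists_cons_of_ne_nil hne
      simp only [List.foldl_cons, pvTokStep, h, if_pos, pvSplitD, ih, hx]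
      simp
    · have hne := pvSplitD_ne_nil t
      obtain ⟨x, xs, hx⟩ := List.exists_cons_of_ne_nil hne
      simp only [List.foldl_cons, pvTokStep, h, pvSplitD, ih, hx]
      simp

theorem pvA_line (cs : List Char) : ∀ (b : Bool) (names : List String) (cur : List Char),
    (((cs.foldl pvA_step (names, cur, b)).1, (cs.foldl pvA_step (names, cur, b)).2.1) :
      List String × List Char) = (pvCleanF b cs).foldl pvTokStep (names, cur) := by
  induction cs with
  | nil => intro b names cur; simp [pvCleanF]
  | cons c t ih =>
    intro b names cur
    by_cases h1 : c = ' '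
    · simp [pvA_step, pvCleanF, h1, ih]
    · by_cases h2 : c = '['
      · simp [pvA_step, pvCleanF, h2, ih]
      · by_cases h3 : c = ']'
        · simp [pvA_step, pvCleanF, h3, ih]
        · cases b with
          | false => simp [pvA_step, pvCleanF, h1, h2, h3, ih]
          | true =>
            by_cases h4 : c = ',' ∨ c = ';'
            · rcases h4 with h4 | h4 <;>
                simp [pvA_step, pvCleanF, h4, ih, pvTokStep]
            · rw [not_or] at h4
              simp [pvA_step, pvCleanF, h1, h2, h3, h4.1, h4.2, ih, pvTokStep]

-- no '[' in h: the state stays `true` and h is filtered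
theorem pvCleanF_true_append (h : List Char) (hn : '[' ∉ h) (r : List Char) :
    pvCleanF true (h ++ r) = h.filter (fun c => c ≠ ' ' && c ≠ ']') ++ pvCleanF true r := by
  induction h with
  | nil => simp
  | cons c t ih =>
    have hc : c ≠ '[' := fun hh => hn (hh ▸ List.mem_cons_self)
    have ht : '[' ∉ t := fun hh => hn (List.mem_cons_of_mem _ hh)
    by_cases h1 : c = ' '
    · simp [pvCleanF, h1, ih ht]
    · by_cases h3 : c = ']'
      · simp [pvCleanF, h3, ih ht]
      · simp [pvCleanF, h1, h3, hc, ih ht]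

-- inside a bracket region: everything up to and including the first ']' is dropped
theorem pvCleanF_false (r : List Char) : pvCleanF false r = pvCleanF true (pvB_afterRB r) := by
  induction r with
  | nil => simp [pvCleanF, pvB_afterRB]
  | cons c t ih =>
    by_cases h3 : c = ']'
    · simp [pvCleanF, h3, pvB_afterRB]
    · by_cases h1 : c = ' ' <;> by_cases h2 : c = '[' <;>
        simp [pvCleanF, h1, h2, h3, ih, pvB_afterRB]

theorem pvB_clean_eq_cleanF (s : List Char) : pvB_clean s = pvCleanF true s := by
  rw [pvB_clean]
  have hhead : '[' ∉ s.takeWhile (· ≠ '[') := by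
    intro hm
    have := List.mem_takeWhile_imp hm
    simp at this
  by_cases h : '[' ∈ s
  · have h1 : s.dropWhile (· ≠ '[') ≠ [] := by
      intro hnil
      have := List.dropWhile_eq_nil_iff.mp hnil '[' h
      simp at this
    have hch : (s.dropWhile (· ≠ '[')).head h1 = '[' := by
      have h0 := List.head_dropWhile_not (fun c : Char => decide (c ≠ '[')) h1
      exact not_not.mp (of_decide_eq_false h0)
    have hd : s.dropWhile (· ≠ '[') = '[' :: (s.dropWhile (· ≠ '[')).drop 1 := by
      conv_lhs => rw [← List.cons_head_tail h1]
      rw [List.drop_one, hch]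
    have hdec : s = s.takeWhile (· ≠ '[') ++ '[' :: (s.dropWhile (· ≠ '[')).drop 1 := by
      conv_lhs => rw [← List.takeWhile_append_dropWhile (p := (· ≠ '[')) (l := s)]
      rw [← hd]
    have IH := pvB_clean_eq_cleanF (pvB_afterRB ((s.dropWhile (· ≠ '[')).drop 1))
    simp only [h, dif_pos, IH]
    conv_rhs => rw [hdec]
    rw [pvCleanF_true_append _ hhead]
    have : pvCleanF true ('[' :: (s.dropWhile (· ≠ '[')).drop 1) =
        pvCleanF false ((s.dropWhile (· ≠ '[')).drop 1) := by
      simp [pvCleanF]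
    rw [this, pvCleanF_false]
  · have hs : s.takeWhile (· ≠ '[') = s := List.takeWhile_eq_self_iff.mpr (by
      intro c hc; simp; exact fun hh => h (hh ▸ hc))
    simp only [h, dif_neg, not_false_iff]
    rw [hs]
    have := pvCleanF_true_append s (by rwa [hs] at hhead) []
    simp only [pvCleanF, List.append_nil] at this
    exact this.symm
termination_by s.length
decreasing_by exact pvB_clean_rec_lt s h

theorem pvReplaceGo (l : List Char) : ∀ (fuel : Nat) (acc : List Char), l.length ≤ fuel →
    PySem.Chars.replace.go [';'] [','] fuel l acc =
      acc.reverse ++ l.map (fun c => if c = ';' then ',' else c) := by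
  induction l with
  | nil =>
    intro fuel acc _
    cases fuel <;> simp [PySem.Chars.replace.go]
  | cons c t ih =>
    intro fuel acc hle
    cases fuel with
    | zero => simp at hle
    | succ n =>
      simp only [PySem.Chars.replace.go]
      by_cases h : c = ';'
      · have hp : [';'].isPrefixOf (c :: t) = true := by simp [h, List.isPrefixOf]
        rw [if_pos hp]
        simp only [List.length_cons] at hle
        have : List.drop [';'].length (c :: t) = t := by simp
        rw [this, ih n _ (by omega)]
        simp [h]
      · have hp : ¬ ([';'].isPrefixOf (c :: t) = true) := by
          simp [List.isPrefixOf]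
          exact fun hh => h hh.symm
        rw [if_neg hp]
        simp only [List.length_cons] at hle
        rw [ih n _ (by omega)]
        simp [h]

theorem pvReplace_single (s : List Char) :
    PySem.Chars.replace s [';'] [','] = s.map (fun c => if c = ';' then ',' else c) := by
  unfold PySem.Chars.replace
  simp only [List.isEmpty_cons, Bool.false_eq_true, if_false]
  rw [pvReplaceGo s s.length [] le_rfl]
  simp

theorem pvModifyHead_id {α : Type} (l : List α) : l.modifyHead (fun x => x) = l := by
  cases l <;> simp

theorem pvSplitOnGo (l : List Char) : ∀ (fuel : Nat) (cur : List Char) (acc : List (List Char)),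
    l.length < fuel →
    PySem.Chars.splitOn.go [','] fuel l cur acc =
      acc.reverse ++ (pvSplitC l).modifyHead (cur.reverse ++ ·) := by
  induction l with
  | nil =>
    intro fuel cur acc hlt
    cases fuel with
    | zero => omega
    | succ n => simp [PySem.Chars.splitOn.go, pvSplitC]
  | cons c t ih =>
    intro fuel cur acc hlt
    cases fuel with
    | zero => omega
    | succ n =>
      simp only [PySem.Chars.splitOn.go]
      by_cases h : c = ','
      · have hp : [','].isPrefixOf (c :: t) = true := by simp [h, List.isPrefixOf]
        rw [if_pos hp]
        have hd : List.drop [','].length (c :: t) = t := by simp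
        simp only [List.length_cons] at hlt
        rw [hd, ih n [] (cur.reverse :: acc) (by omega)]
        simp [pvSplitC, h, pvModifyHead_id]
      · have hp : ¬ ([','].isPrefixOf (c :: t) = true) := by
          simp [List.isPrefixOf]
          exact fun hh => h hh.symm
        rw [if_neg hp]
        simp only [List.length_cons] at hlt
        rw [ih n (c :: cur) acc (by omega)]
        simp only [pvSplitC, h, if_false, List.modifyHead_modifyHead]
        congr 1
        cases pvSplitC t <;> simp

theorem pvSplitOn_single (s : List Char) : PySem.Chars.splitOn s [','] = pvSplitC s := by
  unfold PySem.Chars.splitOn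
  rw [pvSplitOnGo s (s.length + 1) [] [] (by omega)]
  simp [pvModifyHead_id]

-- A's line loop = the token machine over the joined cleaned lines
theorem pvAfold (keyword : String) (lines : List String) :
    ∀ (st : List String × List Char),
    lines.foldl (fun (acc : List String × List Char) raw_line =>
      if PySem.Str.startswith (if keyword ≠ "reg" then
            PySem.Str.replace (PySem.Str.replace raw_line " reg " " ") " reg[" "["
          else raw_line) keyword then
        ((((if keyword ≠ "reg" then
              PySem.Str.replace (PySem.Str.replace raw_line " reg " " ") " reg[" "["
            else raw_line).toList.drop keyword.toList.length).foldl pvA_step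
              (acc.1, acc.2, true)).1,
         (((if keyword ≠ "reg" then
              PySem.Str.replace (PySem.Str.replace raw_line " reg " " ") " reg[" "["
            else raw_line).toList.drop keyword.toList.length).foldl pvA_step
              (acc.1, acc.2, true)).2.1)
      else acc) st
    = (lines.flatMap (pvAdd keyword)).foldl pvTokStep st := by
  induction lines with
  | nil => intro st; simp
  | cons l t ih =>
    intro st
    simp only [List.foldl_cons, List.flatMap_cons, List.foldl_append, ih]
    congr 1
    have hline : (if keyword ≠ "reg" then
          PySem.Str.replace (PySem.Str.replace l " reg " " ") " reg[" "[" else l)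
        = (if keyword = "reg" then l
           else PySem.Str.replace (PySem.Str.replace l " reg " " ") " reg[" "[") := by
      by_cases hk : keyword = "reg" <;> simp [hk]
    rw [pvAdd, hline]
    by_cases hs : PySem.Str.startswith (if keyword = "reg" then l
        else PySem.Str.replace (PySem.Str.replace l " reg " " ") " reg[" "[") keyword
    · rw [if_pos hs, if_pos hs]
      exact pvA_line _ true st.1 st.2
    · rw [if_neg hs, if_neg hs]
      simp only [List.foldl_nil]

-- B's line loop builds exactly the joined cleaned body
theorem pvBfold (keyword : String) (lines : List String) :
    ∀ (body0 : List Char),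
    lines.foldl (fun (body : List Char) raw_line =>
      if PySem.Str.startswith (if keyword = "reg" then raw_line
          else PySem.Str.replace (PySem.Str.replace raw_line " reg " " ") " reg[" "[") keyword then
        body ++ pvB_clean ((if keyword = "reg" then raw_line
          else PySem.Str.replace (PySem.Str.replace raw_line " reg " " ")
            " reg[" "[").toList.drop keyword.toList.length)
      else body) body0
    = body0 ++ lines.flatMap (pvAdd keyword) := by
  induction lines with
  | nil => intro body0; simp
  | cons l t ih =>
    intro body0
    simp only [List.foldl_cons, List.flatMap_cons, ih]
    rw [pvAdd]
    by_cases hs : PySem.Str.startswith (if keyword = "reg" then l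
        else PySem.Str.replace (PySem.Str.replace l " reg " " ") " reg[" "[") keyword
    · rw [if_pos hs, if_pos hs, pvB_clean_eq_cleanF]
      simp [List.append_assoc]
    · rw [if_neg hs, if_neg hs]
      simp

-- ===== VERDICT (by name: the statement is the Claim_ definition above) =====
theorem get_leafs_of_keyword_spec : Claim_equal_get_leafs_of_keyword := by
  intro submodule keyword _
  unfold Spec_get_leafs_of_keyword
  have hA : get_leafs_of_keyword submodule keyword =
      ((submodule.flatMap (pvAdd keyword)).foldl pvTokStep (([], []) : List String × List Char)).1 := by
    simp only [get_leafs_of_keyword]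
    rw [pvAfold keyword submodule (([], []) : List String × List Char)]
  have hB : get_leafs_of_keyword_alt submodule keyword =
      ((pvSplitD (submodule.flatMap (pvAdd keyword))).map String.ofList).dropLast := by
    simp only [get_leafs_of_keyword_alt]
    rw [pvBfold keyword submodule []]
    rw [List.nil_append, pvReplace_single, pvSplitOn_single, pvSplitC_map]
  rw [hA, hB, pvTok_eq_splitD]
  obtain ⟨x, xs, hx⟩ :=
    List.exists_cons_of_ne_nil (pvSplitD_ne_nil (submodule.flatMap (pvAdd keyword)))
  simp [hx, List.map_dropLast]
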